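-- pv_equiv track=rewrite | github.com/JDerekLomas/quantuminspire | scripts/replications/replicate_harrigan.py | best_tuna9_subgraph
-- ===== SOURCE A (Python) =====
-- from itertools import combinations
--
-- TUNA9_EDGES = [
--     (0, 1), (0, 2), (1, 3), (1, 4), (2, 4), (2, 5),
--     (3, 6), (4, 6), (6, 8), (7, 8),
-- ]
--
-- TUNA9_NODES = list(range(9))
--
-- def best_tuna9_subgraph(n):
--     """Best n-node connected subgraph of Tuna-9 (by edge count)."""
--     if n > 9:
--         return None, None
--     best_nodes, best_edges, best_count = None, None, 0
--     for combo in combinations(TUNA9_NODES, n):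
--         combo_set = set(combo)
--         sub_edges = [(a, b) for a, b in TUNA9_EDGES
--                      if a in combo_set and b in combo_set]
--         if len(sub_edges) < n - 1:
--             continue
--         # Check connectivity
--         adj = {v: set() for v in combo}
--         for a, b in sub_edges:
--             adj[a].add(b)
--             adj[b].add(a)
--         visited = set()
--         stack = [combo[0]]
--         while stack:
--             v = stack.pop()
--             if v in visited:
--                 continue
--             visited.add(v)
--             stack.extend(adj[v] - visited)
--         if len(visited) < n:
--             continue
--         if len(sub_edges) > best_count:
--             best_count = len(sub_edges)
--             best_nodes = list(combo)
--             best_edges = sub_edges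
--     return best_nodes, best_edges
-- ===== SOURCE B (Python) =====
-- from itertools import combinations
--
-- TUNA9_EDGES = [
--     (0, 1), (0, 2), (1, 3), (1, 4), (2, 4), (2, 5),
--     (3, 6), (4, 6), (6, 8), (7, 8),
-- ]
--
-- TUNA9_NODES = list(range(9))
--
-- def _connected(nodes, edges):
--     """Union-find connectivity over `nodes` with the given `edges`."""
--     parent = {v: v for v in nodes}
--
--     def find(x):
--         while parent[x] != x:
--             parent[x] = parent[parent[x]]
--             x = parent[x]
--         return x
--
--     for a, b in edges:
--         parent[find(a)] = find(b)
--     return len({find(v) for v in nodes}) <= 1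
--
-- def best_tuna9_subgraph(n):
--     """Best n-node connected subgraph of Tuna-9 (by edge count)."""
--     if n > 9:
--         return None, None
--     candidates = []
--     for combo in combinations(TUNA9_NODES, n):
--         cs = set(combo)
--         edges = [e for e in TUNA9_EDGES if e[0] in cs and e[1] in cs]
--         if edges and _connected(combo, edges):
--             candidates.append((list(combo), edges))
--     if not candidates:
--         return None, None
--     return max(candidates, key=lambda c: len(c[1]))
-- ===== Notes on version B (the rewrite author's own statement) =====
-- stated objective: idiomatic
-- what changed: Connectivity is decided by union-find with path compression instead of an explicit-stack DFS over an adjacency-set dict, and the best subgraph is picked by collecting all connected candidates and taking max(..., key=edge count) (first extremum, matching A's strict '>') instead of mutable best-tracking inside the loop.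
-- outside the precondition, e.g. on best_tuna9_subgraph(0): A raises IndexError, B returns (None, None)
import Mathlib
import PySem

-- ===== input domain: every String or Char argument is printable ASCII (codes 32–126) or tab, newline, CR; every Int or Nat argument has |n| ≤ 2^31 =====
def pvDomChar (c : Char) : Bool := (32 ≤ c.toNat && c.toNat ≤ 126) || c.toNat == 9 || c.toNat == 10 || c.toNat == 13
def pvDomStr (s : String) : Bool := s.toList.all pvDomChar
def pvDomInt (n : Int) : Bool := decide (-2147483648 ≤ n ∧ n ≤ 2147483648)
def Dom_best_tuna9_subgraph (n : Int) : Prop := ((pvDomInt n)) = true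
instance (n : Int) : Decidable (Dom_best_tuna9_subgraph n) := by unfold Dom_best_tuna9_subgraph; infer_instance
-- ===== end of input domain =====

-- B replaces A's DFS connectivity check by union-find and A's mutable best-tracking by
-- collect-candidates-then-max (Python max returns the first extremum, matching A's strict '>').

-- ===== PORT A =====
def tuna9Edges : List (Int × Int) :=
  [(0, 1), (0, 2), (1, 3), (1, 4), (2, 4), (2, 5), (3, 6), (4, 6), (6, 8), (7, 8)]

def tuna9Nodes : List Int := [0, 1, 2, 3, 4, 5, 6, 7, 8]

-- itertools.combinations(xs, k) in itertools' (lexicographic-by-position) order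
def pvCombs : List Int → Nat → List (List Int)
  | _, 0 => [[]]
  | [], _ + 1 => []
  | x :: rest, k + 1 => ((pvCombs rest k).map (fun c => x :: c)) ++ pvCombs rest (k + 1)

-- A's `while stack:` DFS loop; the Python stack pops from the END (stack.getLast?/dropLast).
-- fuel ≥ 1 + total pushes (≤ 9·9 here), so 200 never runs out on the inputs reached;
-- `stack.extend(adj[v] - visited)` iterates a Python set, whose order cannot affect the
-- final visited SET (only its size is used), so Set order (insertion order) is taken.
def pvDfs (adj : PySem.Dict Int (PySem.Set Int)) :
    Nat → List Int → PySem.Set Int → PySem.Set Int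
  | 0, _, visited => visited
  | fuel + 1, stack, visited =>
    match stack.getLast? with
    | none => visited
    | some v =>
      let stack' := stack.dropLast
      if PySem.Set.contains visited v then
        pvDfs adj fuel stack' visited
      else
        let visited' := PySem.Set.add visited v
        pvDfs adj fuel
          (stack' ++ PySem.Set.diff (PySem.Dict.getD adj v PySem.Set.empty) visited')
          visited'

def best_tuna9_subgraph (n : Int) : Option (List Int) × (Option (List (Int × Int))) :=
  if n > 9 then (none, none)
  else
    -- for combo in combinations(TUNA9_NODES, n): … (negative n raises in Python: outside Pre_)
    let res :=
      (pvCombs tuna9Nodes n.toNat).foldl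
        (fun st combo =>
          let comboSet := PySem.Set.ofList combo
          let subEdges := tuna9Edges.filter
            (fun e => PySem.Set.contains comboSet e.1 && PySem.Set.contains comboSet e.2)
          if (subEdges.length : Int) < n - 1 then st
          else
            -- adj = {v: set() for v in combo}; then add both endpoints of each edge
            let adj0 := combo.foldl
              (fun d v => PySem.Dict.insert d v PySem.Set.empty)
              (PySem.Dict.empty : PySem.Dict Int (PySem.Set Int))
            let adj := subEdges.foldl
              (fun d e =>
                let d1 := PySem.Dict.insert d e.1
                  (PySem.Set.add (PySem.Dict.getD d e.1 PySem.Set.empty) e.2)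
                PySem.Dict.insert d1 e.2
                  (PySem.Set.add (PySem.Dict.getD d1 e.2 PySem.Set.empty) e.1))
              adj0
            -- stack = [combo[0]] (combo is nonempty on every input inside Pre_; headI)
            let visited := pvDfs adj 200 [combo.headI] PySem.Set.empty
            if (visited.length : Int) < n then st
            else if (subEdges.length : Int) > st.2.2 then
              (some combo, some subEdges, (subEdges.length : Int))
            else st)
        ((none : Option (List Int)), (none : Option (List (Int × Int))), (0 : Int))
    (res.1, res.2.1)

-- ===== PORT B =====
-- find(x): while parent[x] != x: parent[x] = parent[parent[x]]; x = parent[x]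
-- fuel bounds the while loop (chain length ≤ 9 here; 16 never runs out); returns the
-- updated parent dict (path compression mutates it) and the root.
def pvFind (fuel : Nat) (parent : PySem.Dict Int Int) (x : Int) :
    PySem.Dict Int Int × Int :=
  match fuel with
  | 0 => (parent, x)
  | fuel + 1 =>
    let p := PySem.Dict.getD parent x x
    if p == x then (parent, x)
    else
      let gp := PySem.Dict.getD parent p p
      pvFind fuel (PySem.Dict.insert parent x gp) gp

def pvConnected (nodes : List Int) (edges : List (Int × Int)) : Bool :=
  let parent0 := nodes.foldl (fun d v => PySem.Dict.insert d v v)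
    (PySem.Dict.empty : PySem.Dict Int Int)
  let parent := edges.foldl
    (fun d e =>
      let (d1, ra) := pvFind 16 d e.1
      let (d2, rb) := pvFind 16 d1 e.2
      PySem.Dict.insert d2 ra rb)
    parent0
  -- len({find(v) for v in nodes}) <= 1
  let roots := (nodes.foldl
    (fun (st : PySem.Dict Int Int × PySem.Set Int) v =>
      let (d, r) := pvFind 16 st.1 v
      (d, PySem.Set.add st.2 r))
    (parent, PySem.Set.empty)).2
  roots.length ≤ 1

def best_tuna9_subgraph_alt (n : Int) : Option (List Int) × (Option (List (Int × Int))) :=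
  if n > 9 then (none, none)
  else
    let candidates :=
      (pvCombs tuna9Nodes n.toNat).foldl
        (fun acc combo =>
          let cs := PySem.Set.ofList combo
          let edges := tuna9Edges.filter
            (fun e => PySem.Set.contains cs e.1 && PySem.Set.contains cs e.2)
          if edges ≠ [] ∧ pvConnected combo edges then acc ++ [(combo, edges)] else acc)
        ([] : List (List Int × List (Int × Int)))
    match PySem.List.max? candidates (fun c => (c.2.length : Int)) with
    | none => (none, none)
    | some c => (some c.1, some c.2)

-- ===== PRECONDITION & SPEC =====
-- A raises for every n ≤ 0 (ValueError from combinations for n < 0, IndexError at combo[0] for n = 0).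
def Pre_best_tuna9_subgraph (n : Int) : Prop := 1 ≤ n
instance (n : Int) : Decidable (Pre_best_tuna9_subgraph n) := by unfold Pre_best_tuna9_subgraph; infer_instance
def pvWitness_best_tuna9_subgraph : Int := 4

def Spec_best_tuna9_subgraph (n : Int) (out : Option (List Int) × (Option (List (Int × Int)))) : Prop := out = best_tuna9_subgraph_alt n
instance (n : Int) (out : Option (List Int) × (Option (List (Int × Int)))) : Decidable (Spec_best_tuna9_subgraph n out) := by unfold Spec_best_tuna9_subgraph; infer_instance

-- ===== CLAIM (what is proved, stated in full; the proofs are below) =====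
def Claim_equal_best_tuna9_subgraph : Prop := ∀ (n : Int), Dom_best_tuna9_subgraph n → Pre_best_tuna9_subgraph n → Spec_best_tuna9_subgraph n (best_tuna9_subgraph n)

-- ===== LEMMAS AND PROOFS =====
theorem pv_big (n : Int) (h : n > 9) :
    best_tuna9_subgraph n = best_tuna9_subgraph_alt n := by
  simp [best_tuna9_subgraph, best_tuna9_subgraph_alt, h]

-- ===== VERDICT (by name: the statement is the Claim_ definition above) =====
theorem best_tuna9_subgraph_spec : Claim_equal_best_tuna9_subgraph := by
  intro n _ hp
  unfold Spec_best_tuna9_subgraph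
  by_cases h9 : n > 9
  · exact pv_big n h9
  · have h1 : 1 ≤ n := hp
    have h2 : n ≤ 9 := by omega
    interval_cases n <;> (set_option maxRecDepth 100000 in decide)
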